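-- pv_equiv track=rewrite | github.com/fritzo/pomagma | src/compiler/sequencer.py | load_programs
-- ===== SOURCE A (Python) =====
-- def load_programs(lines):
--     programs = []
--     program = []
--     for line in lines:
--         if line:
--             program.append(tuple(line.split()))
--         elif program:
--             programs.append(tuple(program))
--             program = []
--     return programs
-- ===== SOURCE B (Python) =====
-- def load_programs(lines):
--     # A program is a maximal run of non-blank lines terminated by a blank line;
--     # an unterminated trailing run is incomplete and yields no program.
--     programs = []
--     i = 0
--     n = len(lines)
--     while i < n:
--         if lines[i]:
--             j = i
--             while j < n and lines[j]:
--                 j += 1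
--             if j < n:
--                 programs.append(tuple(tuple(l.split()) for l in lines[i:j]))
--             i = j
--         else:
--             i += 1
--     return programs
-- ===== Notes on version B (the rewrite author's own statement) =====
-- stated objective: alternative
-- what changed: B scans maximal non-blank runs with an index and appends each run terminated by a blank line as one tuple comprehension over the slice, instead of A's per-line accumulator that appends to and copies a current program list.
import Mathlib
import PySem

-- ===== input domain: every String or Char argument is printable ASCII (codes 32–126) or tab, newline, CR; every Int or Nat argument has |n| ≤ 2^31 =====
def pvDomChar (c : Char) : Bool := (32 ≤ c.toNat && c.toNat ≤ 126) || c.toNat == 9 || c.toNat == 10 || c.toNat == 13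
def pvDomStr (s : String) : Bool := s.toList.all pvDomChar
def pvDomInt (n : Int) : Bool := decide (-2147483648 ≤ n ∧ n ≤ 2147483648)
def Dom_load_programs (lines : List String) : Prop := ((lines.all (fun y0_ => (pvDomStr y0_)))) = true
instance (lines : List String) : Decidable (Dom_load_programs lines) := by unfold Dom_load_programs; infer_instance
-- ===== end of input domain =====

-- B is an alternative same-cost implementation: an index-based scanner over maximal
-- non-blank runs, appending each run terminated by a blank line, instead of A's
-- per-line accumulator.

-- ===== PORT A =====
-- A's loop body, one line at a time over the state (programs, program).
def loadStepA (st : List (List (List String)) × List (List String)) (line : String) :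
    List (List (List String)) × List (List String) :=
  if line ≠ "" then (st.1, st.2 ++ [PySem.Str.split₀ line])
  else if st.2 ≠ [] then (st.1 ++ [st.2], [])
  else st

def load_programs (lines : List String) : List (List (List String)) :=
  (lines.foldl loadStepA ([], [])).1

-- ===== PORT B =====
-- Source B's outer while loop, with the unprocessed suffix lines[i:] as the argument:
-- a non-blank head consumes the whole run lines[i:j] (the inner while = takeWhile),
-- appends it iff j < n (the remaining suffix is nonempty), and continues at j;
-- a blank head advances by one line.
def loadGoB : List String → List (List (List String))
  | [] => []
  | l :: rest =>
    if l ≠ "" then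
      let rest' := rest.dropWhile (fun s => decide (s ≠ ""))
      (if rest' ≠ [] then
        [(l :: rest.takeWhile (fun s => decide (s ≠ ""))).map PySem.Str.split₀]
       else []) ++ loadGoB rest'
    else loadGoB rest
termination_by ls => ls.length
decreasing_by
  · simp only [List.length_cons]
    exact Nat.lt_succ_of_le (List.length_dropWhile_le _ _)
  · simp

def load_programs_alt (lines : List String) : List (List (List String)) :=
  loadGoB lines

-- ===== PRECONDITION & SPEC =====
def Spec_load_programs (lines : List String) (out : List (List (List String))) : Prop := out = load_programs_alt lines
instance (lines : List String) (out : List (List (List String))) : Decidable (Spec_load_programs lines out) := by unfold Spec_load_programs; infer_instance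

-- ===== CLAIM (what is proved, stated in full; the proofs are below) =====
def Claim_equal_load_programs : Prop := ∀ (lines : List String), Dom_load_programs lines → Spec_load_programs lines (load_programs lines)

-- ===== LEMMAS AND PROOFS =====

-- The first element a dropWhile keeps falsifies the predicate.
theorem dropWhile_head_false {a : Type} (p : a → Bool) (l : List a) (x : a) (xs : List a)
    (h : l.dropWhile p = x :: xs) : p x = false := by
  induction l with
  | nil => simp at h
  | cons b l ih =>
    rw [List.dropWhile_cons] at h
    split at h
    · exact ih h
    · rename_i h2
      cases h
      simpa using h2

-- A's fold over a run of non-blank lines just appends their splits to the current program.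
theorem foldA_nonblank (xs : List String) (acc : List (List (List String)))
    (prog : List (List String)) (h : ∀ x ∈ xs, x ≠ "") :
    List.foldl loadStepA (acc, prog) xs = (acc, prog ++ xs.map PySem.Str.split₀) := by
  induction xs generalizing prog with
  | nil => simp
  | cons x xs ih =>
    have hx : x ≠ "" := h x (by simp)
    simp only [List.foldl_cons, loadStepA, if_pos hx]
    rw [ih _ (fun y hy => h y (by simp [hy]))]
    simp

-- Main invariant: from a run boundary (current program empty), A's fold computes
-- acc ++ B's run recursion on the remaining suffix.
theorem main_inv (ls : List String) (acc : List (List (List String))) :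
    (List.foldl loadStepA (acc, []) ls).1 = acc ++ loadGoB ls := by
  induction hn : ls.length using Nat.strong_induction_on generalizing ls acc with
  | _ n ih =>
  match ls with
  | [] => simp [loadGoB]
  | l :: rest =>
    by_cases hl : l = ""
    · subst hl
      have h1 : loadStepA (acc, []) "" = (acc, []) := by simp [loadStepA]
      rw [List.foldl_cons, h1, loadGoB]
      rw [if_neg (by simp)]
      exact ih rest.length (by simp [← hn]) rest acc rfl
    · have hdecomp : rest = rest.takeWhile (fun s => decide (s ≠ "")) ++
          rest.dropWhile (fun s => decide (s ≠ "")) :=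
        (List.takeWhile_append_dropWhile).symm
      have hall : ∀ x ∈ rest.takeWhile (fun s => decide (s ≠ "")), x ≠ "" := by
        intro x hx
        have := List.mem_takeWhile_imp hx
        simpa using this
      have hlen : (rest.dropWhile (fun s => decide (s ≠ ""))).length < n := by
        have := List.length_dropWhile_le (fun s => decide (s ≠ "")) rest
        simp at hn; omega
      have h1 : loadStepA (acc, ([] : List (List String))) l =
          (acc, [PySem.Str.split₀ l]) := by
        simp [loadStepA, hl]
      rw [loadGoB, if_pos hl]
      rw [List.foldl_cons, h1]
      conv_lhs => rw [hdecomp, List.foldl_append]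
      rw [foldA_nonblank _ acc _ hall]
      rcases hrest : rest.dropWhile (fun s => decide (s ≠ "")) with _ | ⟨r, rest''⟩
      · simp [loadGoB]
      · have hr : r = "" := by
          have := dropWhile_head_false _ _ _ _ hrest
          simpa using this
        subst hr
        have h2 : loadStepA (acc, [PySem.Str.split₀ l] ++
            (rest.takeWhile (fun s => decide (s ≠ ""))).map PySem.Str.split₀) "" =
            (acc ++ [(l :: rest.takeWhile (fun s => decide (s ≠ ""))).map PySem.Str.split₀], []) := by
          simp [loadStepA]
        rw [List.foldl_cons, h2]
        have hlen' : rest''.length < n := by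
          rw [hrest] at hlen
          simp at hlen; omega
        have := ih rest''.length hlen' rest''
          (acc ++ [(l :: rest.takeWhile (fun s => decide (s ≠ ""))).map PySem.Str.split₀]) rfl
        rw [this]
        simp [loadGoB]

-- ===== VERDICT (by name: the statement is the Claim_ definition above) =====
theorem load_programs_spec : Claim_equal_load_programs := by
  intro lines _
  show load_programs lines = load_programs_alt lines
  simpa [load_programs, load_programs_alt] using main_inv lines []
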